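-- pv_equiv track=rewrite | github.com/psprawka/Zappy | ai/player/playerClass.py | init_vision
-- ===== SOURCE A (Python) =====
-- def init_vision(max_level):
-- 	nbr = 0
-- 	vision = []
-- 	for k in range(1, max_level + 1):
-- 		nbr += 1 + 2*k
-- 	for k in range(nbr):
-- 		vision.append({})
-- 	return (vision)
-- ===== SOURCE B (Python) =====
-- def init_vision(max_level):
--     m = max_level if max_level > 0 else 0
--     return [{} for _ in range(m * m + 2 * m)]
-- ===== Notes on version B (the rewrite author's own statement) =====
-- stated objective: simpler
-- what changed: Replaces the accumulation loop summing 1+2k with the closed form m*m+2*m (m = max(max_level,0)) and builds the list with a single comprehension instead of an append loop.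
import Mathlib
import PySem

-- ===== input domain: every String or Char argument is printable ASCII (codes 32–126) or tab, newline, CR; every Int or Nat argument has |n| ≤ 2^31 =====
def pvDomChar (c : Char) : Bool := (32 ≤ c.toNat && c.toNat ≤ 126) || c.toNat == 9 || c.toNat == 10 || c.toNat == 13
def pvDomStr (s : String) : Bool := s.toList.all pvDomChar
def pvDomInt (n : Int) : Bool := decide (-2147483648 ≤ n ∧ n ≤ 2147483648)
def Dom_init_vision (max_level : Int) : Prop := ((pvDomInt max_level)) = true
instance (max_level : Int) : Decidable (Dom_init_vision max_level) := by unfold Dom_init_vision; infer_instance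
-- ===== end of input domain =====

-- B replaces A's summation loop with the closed form m*m + 2*m (m = max(max_level, 0))
-- and a single comprehension instead of an append loop; objective: simpler.

-- ===== PORT A =====
def init_vision (max_level : Int) : List (List (String × Int)) :=
  let nbr := (PySem.List.pyRange 1 (max_level + 1) 1).foldl (fun n k => n + 1 + 2 * k) 0
  (PySem.List.pyRange 0 nbr 1).foldl (fun v _ => v ++ [[]]) []

-- ===== PORT B =====
def init_vision_alt (max_level : Int) : List (List (String × Int)) :=
  let m := if max_level > 0 then max_level else 0
  (PySem.List.pyRange 0 (m * m + 2 * m) 1).map (fun _ => [])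

-- ===== PRECONDITION & SPEC =====
def Spec_init_vision (max_level : Int) (out : List (List (String × Int))) : Prop := out = init_vision_alt max_level
instance (max_level : Int) (out : List (List (String × Int))) : Decidable (Spec_init_vision max_level out) := by unfold Spec_init_vision; infer_instance

-- ===== CLAIM (what is proved, stated in full; the proofs are below) =====
def Claim_equal_init_vision : Prop := ∀ (max_level : Int), Dom_init_vision max_level → Spec_init_vision max_level (init_vision max_level)

-- ===== LEMMAS AND PROOFS =====

-- A's accumulation loop computes the closed form n*n + 2*n.
theorem init_vision_sum (n : Nat) :
    (PySem.List.pyRange 1 ((n : Int) + 1) 1).foldl (fun a k => a + 1 + 2 * k) 0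
      = (n : Int) * n + 2 * n := by
  induction n with
  | zero => simp [PySem.List.pyRange_one_eq_nil]
  | succ n ih =>
    have h : ((n + 1 : Nat) : Int) + 1 = ((n : Int) + 1) + 1 := by push_cast; ring
    rw [h, PySem.List.pyRange_one_succ_right (by omega), List.foldl_append, ih]
    simp only [List.foldl_cons, List.foldl_nil]
    push_cast
    ring

theorem init_vision_spec : Claim_equal_init_vision := by
  intro ml _
  unfold Spec_init_vision init_vision init_vision_alt
  by_cases h : ml > 0
  · obtain ⟨n, rfl⟩ : ∃ n : Nat, ml = (n : Int) := ⟨ml.toNat, (Int.toNat_of_nonneg (by omega)).symm⟩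
    rw [init_vision_sum n]
    simp only [h, if_pos]
    rw [PySem.List.foldl_append_singleton_eq_map]
    simp
  · have hnil : PySem.List.pyRange 1 (ml + 1) 1 = [] :=
      PySem.List.pyRange_one_eq_nil (by omega)
    rw [hnil]
    simp [h, PySem.List.pyRange_one_eq_nil (le_refl 0)]
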